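-- pv_equiv track=rewrite | github.com/patelrajnath/K-BERT | run_kg_luke_ner.py | voting_choicer
-- ===== SOURCE A (Python) =====
-- from collections import Counter
--
-- def voting_choicer(items):
--     # TODO: Update the code to handle [CLS] and [SEP] class
--     votes = []
--     for item in items:
--         if item and item != '[ENT]' and item != '[X]' and item != '[PAD]':
--             if item == 'O' or item == '[CLS]' or item == '[SEP]':
--                 votes.append(item)
--             else:
--                 votes.append(item[2:])
--
--     vote_labels = Counter(votes)
--     if not len(vote_labels):
--         vote_labels = {'O': 1}
--     lb = sorted(list(vote_labels), key=lambda x: vote_labels[x])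
--
--     final_lb = lb[-1]
--     if final_lb == 'O' or final_lb == '[CLS]' or final_lb == '[SEP]':
--         return final_lb
--     else:
--         return 'B_' + final_lb
-- ===== SOURCE B (Python) =====
-- def voting_choicer(items):
--     # One pass: count cleaned labels into an insertion-ordered dict, then a
--     # linear scan (>= keeps the last-inserted label among ties, matching the
--     # stable ascending sort's last element); no votes list, no sort.
--     counts = {}
--     for item in items:
--         if item and item != '[ENT]' and item != '[X]' and item != '[PAD]':
--             label = item if (item == 'O' or item == '[CLS]' or item == '[SEP]') else item[2:]
--             counts[label] = counts.get(label, 0) + 1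
--     best, best_n = 'O', 0
--     for label, n in counts.items():
--         if n >= best_n:
--             best, best_n = label, n
--     if best == 'O' or best == '[CLS]' or best == '[SEP]':
--         return best
--     return 'B_' + best
-- ===== Notes on version B (the rewrite author's own statement) =====
-- stated objective: simpler
-- what changed: B drops A's votes list, Counter and stable sort: it counts cleaned labels directly into an insertion-ordered dict and takes the winner with one >=-scan over the counts (>= makes ties resolve to the last-inserted key, exactly the last element of A's stable ascending sort), with ('O',0) as the start so the empty case needs no {'O':1} fallback.
import Mathlib
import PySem

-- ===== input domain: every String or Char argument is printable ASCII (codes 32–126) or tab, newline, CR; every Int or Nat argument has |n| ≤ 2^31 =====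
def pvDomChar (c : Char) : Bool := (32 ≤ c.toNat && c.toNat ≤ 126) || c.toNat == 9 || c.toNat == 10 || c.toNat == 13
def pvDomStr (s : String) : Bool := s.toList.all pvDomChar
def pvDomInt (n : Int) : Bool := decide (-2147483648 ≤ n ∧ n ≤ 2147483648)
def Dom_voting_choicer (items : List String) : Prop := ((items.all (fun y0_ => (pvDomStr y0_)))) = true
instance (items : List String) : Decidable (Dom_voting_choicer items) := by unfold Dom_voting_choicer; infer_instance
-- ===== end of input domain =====

-- B replaces A's votes-list + Counter + stable sort + last element by one counting
-- pass into an insertion-ordered dict and a single ≥-scan over its items (simpler, no sort).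

-- ===== PORT A =====
-- Literal port of A: build the votes list, Counter it, fall back to {'O': 1} when
-- empty, sort the keys by count (stable ascending), take lb[-1].
-- `(… ).getD ""` ports lb[-1]: lb is never empty, so the "" default is never used.
def voting_choicer (items : List String) : String :=
  let votes : List String := items.foldl (fun vs item =>
    if ¬ item = "" ∧ ¬ item = "[ENT]" ∧ ¬ item = "[X]" ∧ ¬ item = "[PAD]" then
      if item = "O" ∨ item = "[CLS]" ∨ item = "[SEP]" then vs ++ [item]
      else vs ++ [PySem.Str.slice item (some 2) none]
    else vs) []
  let voteLabels : PySem.Dict String Int :=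
    if (PySem.Dict.counter votes).items.length = 0 then PySem.Dict.empty.insert "O" 1
    else PySem.Dict.counter votes
  let lb : List String := PySem.List.sorted voteLabels.keys (fun x => voteLabels.getD x 0)
  let finalLb : String := (PySem.List.pyGet? lb (-1)).getD ""
  if finalLb = "O" ∨ finalLb = "[CLS]" ∨ finalLb = "[SEP]" then finalLb
  else "B_" ++ finalLb

-- ===== PORT B =====
-- Port of B (Source B): count cleaned labels into an insertion-ordered dict, then one
-- linear scan of counts.items() keeping the last label whose count is ≥ the best.
def voting_choicer_alt (items : List String) : String :=
  let counts : PySem.Dict String Int := items.foldl (fun d item =>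
    if ¬ item = "" ∧ ¬ item = "[ENT]" ∧ ¬ item = "[X]" ∧ ¬ item = "[PAD]" then
      let label := if item = "O" ∨ item = "[CLS]" ∨ item = "[SEP]" then item
                   else PySem.Str.slice item (some 2) none
      d.insert label (d.getD label 0 + 1)
    else d) PySem.Dict.empty
  let best : String × Int := counts.items.foldl
    (fun bn kv => if bn.2 ≤ kv.2 then kv else bn) ("O", 0)
  if best.1 = "O" ∨ best.1 = "[CLS]" ∨ best.1 = "[SEP]" then best.1
  else "B_" ++ best.1

-- ===== PRECONDITION & SPEC =====
def Spec_voting_choicer (items : List String) (out : String) : Prop := out = voting_choicer_alt items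
instance (items : List String) (out : String) : Decidable (Spec_voting_choicer items out) := by unfold Spec_voting_choicer; infer_instance

-- ===== CLAIM (what is proved, stated in full; the proofs are below) =====
def Claim_equal_voting_choicer : Prop := ∀ (items : List String), Dom_voting_choicer items → Spec_voting_choicer items (voting_choicer items)

-- ===== LEMMAS AND PROOFS =====

/-- The filter both loops apply to a raw tag. -/
def pvCond (s : String) : Bool :=
  decide (¬ s = "" ∧ ¬ s = "[ENT]" ∧ ¬ s = "[X]" ∧ ¬ s = "[PAD]")

/-- The cleaned label both loops derive from a kept tag. -/
def pvLab (s : String) : String :=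
  if s = "O" ∨ s = "[CLS]" ∨ s = "[SEP]" then s else PySem.Str.slice s (some 2) none

/-- The cleaned-label sequence (A's `votes`). -/
def pvVotes (items : List String) : List String := (items.filter pvCond).map pvLab

/-- `≥`-replacement step: keep `k` when its key is at least the best's. -/
def pvStep (c : String → Int) (b k : String) : String := if c b ≤ c k then k else b

/-- Last element of the list attaining the maximal key, as a left fold. -/
def pvLastMax (c : String → Int) : List String → Option String
  | [] => none
  | k :: ks => some (List.foldl (pvStep c) k ks)

theorem pvA_votes (items : List String) :
    items.foldl (fun vs item =>
      if ¬ item = "" ∧ ¬ item = "[ENT]" ∧ ¬ item = "[X]" ∧ ¬ item = "[PAD]" then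
        if item = "O" ∨ item = "[CLS]" ∨ item = "[SEP]" then vs ++ [item]
        else vs ++ [PySem.Str.slice item (some 2) none]
      else vs) [] = pvVotes items := by
  have h : (fun (vs : List String) item =>
      if ¬ item = "" ∧ ¬ item = "[ENT]" ∧ ¬ item = "[X]" ∧ ¬ item = "[PAD]" then
        if item = "O" ∨ item = "[CLS]" ∨ item = "[SEP]" then vs ++ [item]
        else vs ++ [PySem.Str.slice item (some 2) none]
      else vs)
      = (fun acc x => if pvCond x = true then acc ++ [pvLab x] else acc) := by
    funext vs it
    simp only [pvCond, pvLab, decide_eq_true_eq]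
    split_ifs <;> rfl
  rw [h, PySem.List.foldl_append_if pvCond pvLab items []]
  rfl

theorem pvFold_if_insert (p : String → Bool) (f : String → String) :
    ∀ (items : List String) (d : PySem.Dict String Int),
    items.foldl (fun d it => if p it = true then d.insert (f it) (d.getD (f it) 0 + 1) else d) d
      = ((items.filter p).map f).foldl (fun d l => d.insert l (d.getD l 0 + 1)) d := by
  intro items
  induction items with
  | nil => intro d; rfl
  | cons x xs ih =>
      intro d
      by_cases hx : p x = true <;> simp [List.foldl, hx, ih]

theorem pvB_counts (items : List String) :
    items.foldl (fun d item =>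
      if ¬ item = "" ∧ ¬ item = "[ENT]" ∧ ¬ item = "[X]" ∧ ¬ item = "[PAD]" then
        let label := if item = "O" ∨ item = "[CLS]" ∨ item = "[SEP]" then item
                     else PySem.Str.slice item (some 2) none
        d.insert label (d.getD label 0 + 1)
      else d) PySem.Dict.empty = PySem.Dict.counter (pvVotes items) := by
  have h : (fun (d : PySem.Dict String Int) item =>
      if ¬ item = "" ∧ ¬ item = "[ENT]" ∧ ¬ item = "[X]" ∧ ¬ item = "[PAD]" then
        let label := if item = "O" ∨ item = "[CLS]" ∨ item = "[SEP]" then item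
                     else PySem.Str.slice item (some 2) none
        d.insert label (d.getD label 0 + 1)
      else d)
      = (fun d it => if pvCond it = true then d.insert (pvLab it) (d.getD (pvLab it) 0 + 1) else d) := by
    funext d it
    simp only [pvCond, pvLab, decide_eq_true_eq]
  unfold pvVotes
  rw [h, pvFold_if_insert pvCond pvLab items PySem.Dict.empty,
    PySem.Dict.foldl_insert_getD_add_one_eq_counter]

theorem pvLastMax_append (c : String → Int) (l : List String) (x m : String)
    (h : pvLastMax c l = some m) :
    pvLastMax c (l ++ [x]) = some (pvStep c m x) := by
  cases l with
  | nil => simp [pvLastMax] at h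
  | cons k ks =>
      simp only [pvLastMax, Option.some.injEq] at h
      simp [pvLastMax, List.foldl_append, h]

theorem pvInsertBy_getLast? (c : String → Int) (x : String) :
    ∀ (ys : List String), ys.Pairwise (fun a b => c a ≤ c b) →
    ∀ m, ys.getLast? = some m →
    (PySem.List.insertBy (fun a b => decide (c a < c b)) x ys).getLast? = some (pvStep c m x) := by
  intro ys
  induction ys with
  | nil => intro _ m hm; simp at hm
  | cons y ys ih =>
      intro hpw m hm
      cases ys with
      | nil =>
          have hym : y = m := by simpa using hm
          subst hym
          by_cases hlt : c x < c y
          · simp [PySem.List.insertBy, hlt, pvStep, not_le.mpr hlt]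
          · simp [PySem.List.insertBy, hlt, pvStep, not_lt.mp hlt]
      | cons z zs =>
          have hys : (z :: zs).getLast? = some m := by
            simpa [List.getLast?_cons_cons] using hm
          have hm_mem : m ∈ z :: zs := List.mem_of_getLast? hys
          have hy_le : c y ≤ c m := (List.pairwise_cons.mp hpw).1 m hm_mem
          by_cases hlt : c x < c y
          · have hxm : c x < c m := lt_of_lt_of_le hlt hy_le
            rw [PySem.List.insertBy.eq_2, if_pos (by simpa using hlt)]
            simp [List.getLast?_cons_cons, hys, pvStep, not_le.mpr hxm]
          · have htail := ih (List.pairwise_cons.mp hpw).2 m hys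
            have hne : PySem.List.insertBy (fun a b => decide (c a < c b)) x (z :: zs) ≠ [] := by
              intro hnil
              have := (PySem.List.insertBy_perm (fun a b => decide (c a < c b)) x (z :: zs)).length_eq
              simp [hnil] at this
            rw [PySem.List.insertBy.eq_2, if_neg (by simpa using hlt)]
            cases hI : PySem.List.insertBy (fun a b => decide (c a < c b)) x (z :: zs) with
            | nil => exact absurd hI hne
            | cons a as =>
                rw [List.getLast?_cons_cons]
                rw [hI] at htail
                exact htail

theorem pvSorted_getLast? (c : String → Int) (l : List String) :
    (PySem.List.sorted l c).getLast? = pvLastMax c l := by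
  induction l using List.reverseRecOn with
  | nil => rfl
  | append_singleton l x ih =>
      rw [PySem.List.sorted_eq_foldl_insertBy] at ih ⊢
      rw [List.foldl_append]
      simp only [List.foldl]
      cases hl : List.foldl (fun acc x => PySem.List.insertBy (fun a b => decide (c a < c b)) x acc) [] l with
      | nil =>
          rw [hl] at ih
          simp only [List.getLast?_nil] at ih
          cases l with
          | nil => simp [PySem.List.insertBy, pvLastMax]
          | cons k ks => simp [pvLastMax] at ih
      | cons y ys =>
          rw [hl] at ih
          have hpw : (y :: ys).Pairwise (fun a b => c a ≤ c b) := by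
            have := PySem.List.sorted_pairwise l c
            rw [PySem.List.sorted_eq_foldl_insertBy, hl] at this
            exact this
          obtain ⟨m, hm⟩ : ∃ m, (y :: ys).getLast? = some m := by
            cases hm : (y :: ys).getLast? with
            | none => simp [List.getLast?_eq_none_iff] at hm
            | some m => exact ⟨m, rfl⟩
          rw [pvInsertBy_getLast? c x (y :: ys) hpw m hm]
          rw [ih] at hm
          exact (pvLastMax_append c l x m hm).symm

theorem pvPyGet_neg_one (l : List String) (h : l ≠ []) :
    PySem.List.pyGet? l (-1) = l.getLast? := by
  have hlen : 0 < l.length := List.length_pos_iff.mpr h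
  unfold PySem.List.pyGet? PySem.List.pyIdx?
  have h1 : ¬ ((0 : Int) ≤ -1) := by omega
  have h2 : (-(l.length : Int) ≤ -1) := by omega
  simp [h2, List.getLast?_eq_getElem?]

theorem pvPairFold (c : String → Int) :
    ∀ (ks : List String) (b : String),
    List.foldl (fun (bn : String × Int) kv => if bn.2 ≤ kv.2 then kv else bn) (b, c b)
      (ks.map (fun k => (k, c k)))
    = (List.foldl (pvStep c) b ks, c (List.foldl (pvStep c) b ks)) := by
  intro ks
  induction ks with
  | nil => intro b; rfl
  | cons k ks ih =>
      intro b
      simp only [List.map_cons, List.foldl_cons]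
      by_cases hbk : c b ≤ c k <;> simp [pvStep, hbk, ih]

theorem pvMain (items : List String) : voting_choicer items = voting_choicer_alt items := by
  unfold voting_choicer voting_choicer_alt
  simp only []
  rw [pvA_votes items, pvB_counts items]
  by_cases hv : pvVotes items = []
  · rw [hv]; decide
  · set votes := pvVotes items with hvdef
    have hc : (fun x => (PySem.Dict.counter votes).getD x 0)
        = (fun k => ((votes.count k : Nat) : Int)) := by
      funext k; exact PySem.Dict.getD_counter votes k
    have hitems := PySem.Dict.items_counter votes
    have hkeys := PySem.Dict.keys_counter votes
    have hSne : PySem.Set.ofList votes ≠ [] := by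
      intro hnil
      obtain ⟨v, hvmem⟩ := List.exists_mem_of_ne_nil votes hv
      have : v ∈ PySem.Set.ofList votes := (PySem.Set.mem_ofList votes v).mpr hvmem
      simp [hnil] at this
    have hlenne : ¬ (PySem.Dict.counter votes).items.length = 0 := by
      rw [hitems]; simpa using hSne
    simp only [hlenne, if_false]
    rw [hkeys, hc, hitems]
    cases hS : PySem.Set.ofList votes with
    | nil => exact absurd hS hSne
    | cons k0 ks =>
        set c : String → Int := fun k => ((votes.count k : Nat) : Int) with hcdef
        have hsne : PySem.List.sorted (k0 :: ks) c ≠ [] := by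
          intro hnil
          have := (PySem.List.sorted_perm (k0 :: ks) c false).length_eq
          simp [hnil] at this
        rw [pvPyGet_neg_one _ hsne, pvSorted_getLast? c (k0 :: ks)]
        simp only [pvLastMax, Option.getD_some]
        have hmap : (fun (k : String) => (k, ((votes.count k : Nat) : Int)))
            = (fun k => (k, c k)) := rfl
        rw [hmap]
        simp only [List.map_cons, List.foldl_cons]
        have h0 : (0 : Int) ≤ c k0 := by simp [hcdef]
        simp only [h0, if_true]
        rw [pvPairFold c ks k0]

-- ===== VERDICT (by name: the statement is the Claim_ definition above) =====
theorem voting_choicer_spec : Claim_equal_voting_choicer := by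
  intro items _
  unfold Spec_voting_choicer
  exact pvMain items
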